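-- pv_equiv track=rewrite | github.com/digi0ps/ChennaiLoco | train/views.py | check
-- ===== SOURCE A (Python) =====
-- def check(array, first, second):
-- 	"""
-- 	Checks if two items are present in a list of items one after the other
-- 	"""
-- 	# Position variables for the first item and second item
-- 	f_pos, s_pos = [-1, -1]
-- 	l = len(array)
-- 	for i in range(0, l):
-- 		if array[i] == first:
-- 			f_pos = i
-- 		elif array[i] == second:
-- 			s_pos = i
-- 	# Returns true only if position of second item greater than first item
-- 	# And both are not in their default values
-- 	if s_pos > -1 and f_pos > -1 and s_pos > f_pos:
-- 		return True
-- 	else: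
-- 		return False
-- ===== SOURCE B (Python) =====
-- def check(array, first, second):
--     f_pos = max((i for i, x in enumerate(array) if x == first), default=-1)
--     s_pos = max((i for i, x in enumerate(array) if x == second), default=-1)
--     return f_pos > -1 and s_pos > f_pos
-- ===== Notes on version B (the rewrite author's own statement) =====
-- stated objective: simpler
-- what changed: Replaced A's single if/elif loop tracking two mutable position variables by two independent max-over-matching-indices scans with -1 defaults and a direct comparison.
import Mathlib
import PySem

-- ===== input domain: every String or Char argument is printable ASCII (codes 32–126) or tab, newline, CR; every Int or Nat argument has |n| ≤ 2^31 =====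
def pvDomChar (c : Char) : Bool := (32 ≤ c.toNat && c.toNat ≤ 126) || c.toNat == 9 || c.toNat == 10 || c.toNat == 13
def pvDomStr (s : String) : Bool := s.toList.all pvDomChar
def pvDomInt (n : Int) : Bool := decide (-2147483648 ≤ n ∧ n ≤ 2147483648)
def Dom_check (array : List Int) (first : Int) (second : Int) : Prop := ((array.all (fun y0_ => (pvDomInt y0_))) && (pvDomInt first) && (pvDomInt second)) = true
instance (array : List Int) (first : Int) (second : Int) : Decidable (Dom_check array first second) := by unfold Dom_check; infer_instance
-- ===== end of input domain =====

-- B replaces A's single tracking loop (if/elif updating two position variables) by two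
-- independent last-index scans (max of matching indices with default -1); objective: simpler.

-- ===== PORT A =====
def check (array : List Int) (first : Int) (second : Int) : Bool :=
  let l : Int := PySem.List.len array
  let st :=
    (PySem.List.pyRange 0 l).foldl
      (fun (p : Int × Int) i =>
        if PySem.List.pyGetD array i 0 = first then (i, p.2)
        else if PySem.List.pyGetD array i 0 = second then (p.1, i)
        else p)
      (-1, -1)
  decide (st.2 > -1 ∧ st.1 > -1 ∧ st.2 > st.1)

-- ===== PORT B =====
def check_alt (array : List Int) (first : Int) (second : Int) : Bool :=
  let fPos :=
    PySem.List.maxD (((PySem.List.enumerate array).filter (fun p => p.2 = first)).map (fun p => p.1))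
      (fun i => i) (-1)
  let sPos :=
    PySem.List.maxD (((PySem.List.enumerate array).filter (fun p => p.2 = second)).map (fun p => p.1))
      (fun i => i) (-1)
  decide (fPos > -1 ∧ sPos > fPos)

-- ===== PRECONDITION & SPEC =====
def Spec_check (array : List Int) (first : Int) (second : Int) (out : Bool) : Prop := out = check_alt array first second
instance (array : List Int) (first : Int) (second : Int) (out : Bool) : Decidable (Spec_check array first second out) := by unfold Spec_check; infer_instance

-- ===== CLAIM (what is proved, stated in full; the proofs are below) =====
def Claim_equal_check : Prop := ∀ (array : List Int) (first : Int) (second : Int), Dom_check array first second → Spec_check array first second (check array first second)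

-- ===== LEMMAS AND PROOFS =====

-- A's loop body, as a step function over (index, value) pairs.
def stepA (first second : Int) (p : Int × Int) (q : Int × Int) : Int × Int :=
  if q.2 = first then (q.1, p.2)
  else if q.2 = second then (p.1, q.1)
  else p

theorem stepA_first (first second : Int) (p q : Int × Int) (h : q.2 = first) :
    stepA first second p q = (q.1, p.2) := by unfold stepA; rw [if_pos h]

theorem stepA_second (first second : Int) (p q : Int × Int) (h1 : ¬ q.2 = first) (h2 : q.2 = second) :
    stepA first second p q = (p.1, q.1) := by unfold stepA; rw [if_neg h1, if_pos h2]

theorem stepA_other (first second : Int) (p q : Int × Int) (h1 : ¬ q.2 = first) (h2 : ¬ q.2 = second) :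
    stepA first second p q = p := by unfold stepA; rw [if_neg h1, if_neg h2]

-- Folding A's step over enumerate = running max of matched indices (elif: second excludes first).
theorem foldl_stepA (first second : Int) (xs : List Int) :
    ∀ (s f0 s0 : Int), f0 < s → s0 < s →
    (PySem.List.enumerate xs s).foldl (stepA first second) (f0, s0)
    = ((((PySem.List.enumerate xs s).filter (fun p => p.2 = first)).map (fun p => p.1)).foldl max f0,
       (((PySem.List.enumerate xs s).filter (fun p => ¬ p.2 = first ∧ p.2 = second)).map (fun p => p.1)).foldl max s0) := by
  induction xs with
  | nil => intro s f0 s0 _ _; simp [PySem.List.enumerate_nil]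
  | cons x t ih =>
    intro s f0 s0 hf hs
    rw [PySem.List.enumerate_cons]
    by_cases h1 : x = first
    · rw [List.foldl_cons, stepA_first first second _ _ h1,
        List.filter_cons_of_pos (by simp [h1]), List.filter_cons_of_neg (by simp [h1]),
        List.map_cons, List.foldl_cons, ih (s+1) s s0 (by omega) (by omega),
        max_eq_right hf.le]
    · by_cases h2 : x = second
      · rw [List.foldl_cons, stepA_second first second _ _ h1 h2,
          List.filter_cons_of_neg (by simp [h1]), List.filter_cons_of_pos (by simp [h2]; exact fun h => h1 (h2.trans h)),
          List.map_cons, List.foldl_cons, ih (s+1) f0 s (by omega) (by omega),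
          max_eq_right hs.le]
      · rw [List.foldl_cons, stepA_other first second _ _ h1 h2,
          List.filter_cons_of_neg (by simp [h1]), List.filter_cons_of_neg (by simp [h2])]
        exact ih (s+1) f0 s0 (by omega) (by omega)

-- max(l, default=-1) is the running max from -1 when every element is nonnegative.
theorem maxD_eq_foldl_max (l : List Int) (h : ∀ y ∈ l, 0 ≤ y) :
    PySem.List.maxD l (fun i => i) (-1) = l.foldl max (-1) := by
  cases l with
  | nil => rfl
  | cons x t =>
    have hx : (0 : Int) ≤ x := h x (List.mem_cons_self)
    rw [PySem.List.maxD, PySem.List.max?_id_cons, Option.getD_some, List.foldl_cons,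
      max_eq_right (by omega : (-1 : Int) ≤ x)]

-- indices coming out of enumerate (start 0) are nonnegative
theorem enum_fst_nonneg (xs : List Int) (q : Int × Int → Bool) :
    ∀ y ∈ ((PySem.List.enumerate xs).filter q).map (fun r => r.1), 0 ≤ y := by
  intro y hy
  obtain ⟨r, hr, rfl⟩ := List.mem_map.mp hy
  have hr' : r ∈ PySem.List.enumerate xs 0 := List.mem_filter.mp hr |>.1
  rw [PySem.List.mem_enumerate_iff] at hr'
  obtain ⟨k, hk, rfl⟩ := hr'
  simp

-- ===== VERDICT (by name: the statement is the Claim_ definition above) =====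
theorem check_spec : Claim_equal_check := by
  intro array first second _
  simp only [Spec_check, check, check_alt]
  rw [show (PySem.List.pyRange 0 (PySem.List.len array)).foldl
        (fun (p : Int × Int) i =>
          if PySem.List.pyGetD array i 0 = first then (i, p.2)
          else if PySem.List.pyGetD array i 0 = second then (p.1, i)
          else p) (-1, -1)
      = (PySem.List.enumerate array).foldl (stepA first second) (-1, -1) by
    rw [PySem.List.enumerate_eq_map_pyRange array 0, List.foldl_map]; rfl]
  rw [foldl_stepA first second array 0 (-1) (-1) (by omega) (by omega)]
  by_cases hfs : first = second
  · subst hfs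
    have hempty : (PySem.List.enumerate array 0).filter (fun p => ¬ p.2 = first ∧ p.2 = first) = [] := by
      apply List.filter_eq_nil_iff.mpr
      intro p _; simp
    rw [hempty]
    simp only [List.map_nil, List.foldl_nil]
    simp
  · have hfilt : (PySem.List.enumerate array 0).filter (fun p => ¬ p.2 = first ∧ p.2 = second)
        = (PySem.List.enumerate array 0).filter (fun p => p.2 = second) := by
      apply List.filter_congr
      intro p _
      by_cases h : p.2 = second
      · simp [h]
        omega
      · simp [h]
    rw [hfilt,
      maxD_eq_foldl_max _ (enum_fst_nonneg array _),
      maxD_eq_foldl_max _ (enum_fst_nonneg array _)]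
    simp only [decide_eq_decide]
    constructor
    · rintro ⟨h1, h2, h3⟩; exact ⟨h2, h3⟩
    · rintro ⟨h2, h3⟩; exact ⟨by omega, h2, h3⟩
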